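-- pv_equiv track=rewrite | github.com/RaghavShahMU/snowflake_downloads | analysis/full_feature_readout_analysis.py | _build_leadership_axis_map
-- ===== SOURCE A (Python) =====
-- CLASS_DIMS = [
--     "team_orientation", "domain_knowledge_depth", "operational_scope", "data_flow_direction",
--     "autonomy_level", "functional_archetype", "tone_and_persona", "execution_dataset",
--     "state_persistence", "external_integration_scope", "output_modality",
--     "domain_industry_vertical", "use_case_context", "implied_end_date",
-- ]
--
-- TOOL_GROUP_SIZE = 6
--
-- TOOL_GROUP_PREFIX = "tools_g"
--
-- def _split_tool_columns_into_groups(tool_cols, per_group=TOOL_GROUP_SIZE):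
--     cols = sorted(str(c) for c in tool_cols)
--     if not cols:
--         return []
--     groups = []
--     for i in range(0, len(cols), per_group):
--         chunk = cols[i : i + per_group]
--         groups.append((f"{TOOL_GROUP_PREFIX}{len(groups) + 1}", chunk))
--     return groups
--
-- def _build_leadership_axis_map(class_cols, tool_cols, trigger_cols, template_cols, tool_group_size=TOOL_GROUP_SIZE):
--     dim_ids = [d for d in CLASS_DIMS if any(str(c).startswith(d + "=") for c in class_cols)]
--     axis_map = {}
--     for d in dim_ids:
--         axis_map[d] = [c for c in class_cols if str(c).startswith(d + "=")]
--     tool_groups = _split_tool_columns_into_groups(tool_cols, per_group=tool_group_size)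
--     for gid, chunk in tool_groups:
--         axis_map[gid] = chunk
--     axis_map["triggers"] = list(trigger_cols)
--     axis_map["templates"] = list(template_cols)
--     return dim_ids, tool_groups, axis_map
-- ===== SOURCE B (Python) =====
-- CLASS_DIMS = [
--     "team_orientation", "domain_knowledge_depth", "operational_scope", "data_flow_direction",
--     "autonomy_level", "functional_archetype", "tone_and_persona", "execution_dataset",
--     "state_persistence", "external_integration_scope", "output_modality",
--     "domain_industry_vertical", "use_case_context", "implied_end_date",
-- ]
--
-- TOOL_GROUP_SIZE = 6
--
-- TOOL_GROUP_PREFIX = "tools_g"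
--
--
-- def _split_tool_columns_into_groups(tool_cols, per_group=TOOL_GROUP_SIZE):
--     # Take/drop chunking of the sorted names instead of a range-indexed slicing loop.
--     cols = sorted(str(c) for c in tool_cols)
--     chunks = []
--     while cols and per_group > 0:
--         chunks.append(cols[:per_group])
--         cols = cols[per_group:]
--     return [(f"{TOOL_GROUP_PREFIX}{k}", ch) for k, ch in enumerate(chunks, 1)]
--
--
-- def _build_leadership_axis_map(class_cols, tool_cols, trigger_cols, template_cols, tool_group_size=TOOL_GROUP_SIZE):
--     # Single pass over class_cols: bucket each column by its prefix before the first '='.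
--     dims = set(CLASS_DIMS)
--     buckets = {}
--     for c in class_cols:
--         s = str(c)
--         i = s.find("=")
--         if i != -1:
--             p = s[:i]
--             if p in dims:
--                 buckets.setdefault(p, []).append(c)
--     dim_ids = [d for d in CLASS_DIMS if d in buckets]
--     tool_groups = _split_tool_columns_into_groups(tool_cols, per_group=tool_group_size)
--     entries = (
--         [(d, buckets[d]) for d in dim_ids]
--         + tool_groups
--         + [("triggers", list(trigger_cols)), ("templates", list(template_cols))]
--     )
--     return dim_ids, tool_groups, dict(entries)
-- ===== Notes on version B (the rewrite author's own statement) =====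
-- stated objective: faster
-- what changed: Replaces the per-dimension double scan of class_cols (an any() pass plus a filter pass for each of the 14 CLASS_DIMS) with one bucketing pass over class_cols keyed by the prefix before the first '='; the tool-group splitter is rewritten as take/drop chunking in a while loop numbered by enumerate instead of a range-indexed slicing loop; and the axis map is built as one entries list turned into a dict instead of three staged insertion phases.
import Mathlib
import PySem

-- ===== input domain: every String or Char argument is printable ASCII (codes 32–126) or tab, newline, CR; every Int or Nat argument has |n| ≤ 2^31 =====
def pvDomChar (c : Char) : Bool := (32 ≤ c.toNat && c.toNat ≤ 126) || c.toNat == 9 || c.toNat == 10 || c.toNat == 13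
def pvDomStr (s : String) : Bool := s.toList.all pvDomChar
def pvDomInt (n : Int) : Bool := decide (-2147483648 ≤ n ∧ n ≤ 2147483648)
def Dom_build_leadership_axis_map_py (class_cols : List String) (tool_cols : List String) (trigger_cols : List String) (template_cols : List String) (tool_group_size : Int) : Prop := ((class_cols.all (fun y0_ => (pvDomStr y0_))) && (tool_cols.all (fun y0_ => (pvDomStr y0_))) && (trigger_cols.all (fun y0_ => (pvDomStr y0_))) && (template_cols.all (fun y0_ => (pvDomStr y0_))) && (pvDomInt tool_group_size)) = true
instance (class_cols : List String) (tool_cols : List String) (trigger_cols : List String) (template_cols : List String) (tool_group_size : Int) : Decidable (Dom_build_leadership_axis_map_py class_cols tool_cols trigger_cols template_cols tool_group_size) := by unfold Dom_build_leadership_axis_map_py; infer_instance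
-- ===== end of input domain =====

-- B replaces A's per-dimension double scan of class_cols by ONE bucketing pass, replaces A's
-- range-indexed tool-group loop by take/drop chunking + enumerate, and builds the axis map
-- as one entries list turned into a dict (objective: alternative single-pass structure).

-- ===== PORT A =====
def pvClassDims : List String :=
  ["team_orientation", "domain_knowledge_depth", "operational_scope", "data_flow_direction",
   "autonomy_level", "functional_archetype", "tone_and_persona", "execution_dataset",
   "state_persistence", "external_integration_scope", "output_modality",
   "domain_industry_vertical", "use_case_context", "implied_end_date"]

-- Source A's _split_tool_columns_into_groups (str(c) is the identity on strings)
def pvSplitToolGroups (tool_cols : List String) (per_group : Int) : List (String × List String) :=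
  let cols := PySem.List.sorted tool_cols (fun s => s) false
  if cols = [] then []
  else
    (PySem.List.pyRange 0 (cols.length : Int) per_group).foldl
      (fun groups i =>
        groups ++ [("tools_g" ++ PySem.Int.toStr ((groups.length : Int) + 1),
                    PySem.List.slice cols (some i) (some (i + per_group)))]) []

def build_leadership_axis_map_py (class_cols : List String) (tool_cols : List String) (trigger_cols : List String) (template_cols : List String) (tool_group_size : Int) : List String × (List (String × List String)) × (List (String × List String)) :=
  let dim_ids := pvClassDims.foldl
    (fun acc d => if class_cols.any (fun c => PySem.Str.startswith c (d ++ "=")) then acc ++ [d] else acc) []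
  let axis0 : PySem.Dict String (List String) := dim_ids.foldl
    (fun m d => m.insert d
      (class_cols.foldl (fun acc c => if PySem.Str.startswith c (d ++ "=") then acc ++ [c] else acc) []))
    PySem.Dict.empty
  let tool_groups := pvSplitToolGroups tool_cols tool_group_size
  let axis1 := tool_groups.foldl (fun m g => m.insert g.1 g.2) axis0
  let axis2 := (axis1.insert "triggers" trigger_cols).insert "templates" template_cols
  (dim_ids, tool_groups, axis2.items)

-- ===== PORT B =====
-- Source B's while-loop 'chunks.append(cols[:n]); cols = cols[n:]', with len(cols) as fuel
def pvChunksGo : Nat → List String → Int → List (List String)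
  | 0, _, _ => []
  | fuel + 1, cols, n =>
    if cols ≠ [] ∧ 0 < n then
      PySem.List.slice cols none (some n) :: pvChunksGo fuel (PySem.List.slice cols (some n) none) n
    else []

def pvChunks (cols : List String) (n : Int) : List (List String) :=
  pvChunksGo cols.length cols n

-- Source B's _split_tool_columns_into_groups: sort, chunk, then number with enumerate(…, 1)
def pvSplitToolGroupsAlt (tool_cols : List String) (per_group : Int) : List (String × List String) :=
  (PySem.List.enumerate (pvChunks (PySem.List.sorted tool_cols (fun s => s) false) per_group) 1).map
    (fun kc => ("tools_g" ++ PySem.Int.toStr kc.1, kc.2))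

def build_leadership_axis_map_py_alt (class_cols : List String) (tool_cols : List String) (trigger_cols : List String) (template_cols : List String) (tool_group_size : Int) : List String × (List (String × List String)) × (List (String × List String)) :=
  let dims := PySem.Set.ofList pvClassDims
  -- one pass: buckets.setdefault(prefix, []).append(c) is Dict.modify prefix [] (· ++ [c])
  let buckets : PySem.Dict String (List String) := class_cols.foldl
    (fun m c =>
      let i := PySem.Str.find c "="
      if i ≠ -1 then
        let p := PySem.Str.slice c none (some i)
        if dims.contains p then m.modify p [] (· ++ [c]) else m
      else m)
    PySem.Dict.empty
  let dim_ids := pvClassDims.filter (fun d => buckets.contains d)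
  let tool_groups := pvSplitToolGroupsAlt tool_cols tool_group_size
  -- buckets[d] is total here (d ∈ dim_ids ⇒ d ∈ buckets), so getD is exact
  let entries := dim_ids.map (fun d => (d, buckets.getD d []))
      ++ tool_groups ++ [("triggers", trigger_cols), ("templates", template_cols)]
  (dim_ids, tool_groups, (PySem.Dict.ofList entries).items)

-- ===== PRECONDITION & SPEC =====
-- Pre_ excludes only the inputs where Python A raises: tool_group_size == 0 with a nonempty
-- tool_cols makes range(0, len(cols), 0) raise ValueError.
def Pre_build_leadership_axis_map_py (class_cols : List String) (tool_cols : List String) (trigger_cols : List String) (template_cols : List String) (tool_group_size : Int) : Prop :=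
  tool_group_size ≠ 0 ∨ tool_cols = []
instance (class_cols : List String) (tool_cols : List String) (trigger_cols : List String) (template_cols : List String) (tool_group_size : Int) : Decidable (Pre_build_leadership_axis_map_py class_cols tool_cols trigger_cols template_cols tool_group_size) := by unfold Pre_build_leadership_axis_map_py; infer_instance

def pvWitness_build_leadership_axis_map_py : List String × List String × List String × List String × Int :=
  (["team_orientation=east", "autonomy_level=low", "team_orientation=west", "other"],
   ["t_b", "t_a", "t_c"], ["trig_1"], ["tmpl_1"], 2)

def Spec_build_leadership_axis_map_py (class_cols : List String) (tool_cols : List String) (trigger_cols : List String) (template_cols : List String) (tool_group_size : Int) (out : List String × (List (String × List String)) × (List (String × List String))) : Prop := out = build_leadership_axis_map_py_alt class_cols tool_cols trigger_cols template_cols tool_group_size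
instance (class_cols : List String) (tool_cols : List String) (trigger_cols : List String) (template_cols : List String) (tool_group_size : Int) (out : List String × (List (String × List String)) × (List (String × List String))) : Decidable (Spec_build_leadership_axis_map_py class_cols tool_cols trigger_cols template_cols tool_group_size out) := by unfold Spec_build_leadership_axis_map_py; infer_instance

-- ===== CLAIM (what is proved, stated in full; the proofs are below) =====
def Claim_equal_build_leadership_axis_map_py : Prop := ∀ (class_cols : List String) (tool_cols : List String) (trigger_cols : List String) (template_cols : List String) (tool_group_size : Int), Dom_build_leadership_axis_map_py class_cols tool_cols trigger_cols template_cols tool_group_size → Pre_build_leadership_axis_map_py class_cols tool_cols trigger_cols template_cols tool_group_size → Spec_build_leadership_axis_map_py class_cols tool_cols trigger_cols template_cols tool_group_size (build_leadership_axis_map_py class_cols tool_cols trigger_cols template_cols tool_group_size)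
-- ===== LEMMAS AND PROOFS =====

theorem pv_singleton_prefix {a : Char} {l : List Char} : [a] <+: l ↔ l.head? = some a := by
  cases l with
  | nil => simp
  | cons b t => simp [List.cons_prefix_cons, eq_comm]

theorem pv_prefix_iff (s D : List Char) (hD : '=' ∉ D) :
    PySem.Chars.startswith s (D ++ ['=']) = true ↔
    (PySem.Chars.find s ['='] ≠ -1 ∧
     PySem.Chars.slice s none (some (PySem.Chars.find s ['='])) = D) := by
  rw [PySem.Chars.startswith_iff]
  constructor
  · rintro ⟨t, ht⟩
    have ht : D ++ '=' :: t = s := by simpa using ht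
    have hinf : ['='] <:+: s := ⟨D, t, by simpa using ht⟩
    have hne : PySem.Chars.find s ['='] ≠ -1 := by
      rw [Ne, PySem.Chars.find_eq_neg_one_iff]; simpa using hinf
    have hpos : 0 ≤ PySem.Chars.find s ['='] := by
      have := PySem.Chars.neg_one_le_find s ['=']; omega
    obtain ⟨hpre, hmin⟩ := PySem.Chars.find_spec hpos
    set i := (PySem.Chars.find s ['=']).toNat with hi
    have hiD : i = D.length := by
      rcases lt_trichotomy i D.length with hlt | heq | hgt
      · exfalso
        have h1 : s[i]? = some '=' := by
          rw [← List.head?_drop]; exact pv_singleton_prefix.mp hpre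
        have h2 : s[i]? = D[i]? := by
          rw [← ht, List.getElem?_append_left hlt]
        have h3 : D[i]? = some '=' := h2 ▸ h1
        exact hD (List.mem_of_getElem? h3)
      · exact heq
      · exfalso
        have : ['='] <+: List.drop D.length s := by
          rw [← ht, List.drop_left]
          exact ⟨t, rfl⟩
        exact hmin D.length hgt this
    constructor
    · exact hne
    · rw [PySem.Chars.slice_eq_listSlice, PySem.List.slice_to s hpos, ← hi, hiD, ← ht]
      exact List.take_left
  · rintro ⟨hne, hsl⟩
    have hpos : 0 ≤ PySem.Chars.find s ['='] := by
      have := PySem.Chars.neg_one_le_find s ['=']; omega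
    obtain ⟨hpre, -⟩ := PySem.Chars.find_spec hpos
    rw [PySem.Chars.slice_eq_listSlice, PySem.List.slice_to s hpos] at hsl
    obtain ⟨t, ht⟩ := hpre
    refine ⟨t, ?_⟩
    calc D ++ ['='] ++ t = D ++ (['='] ++ t) := by simp
    _ = D ++ List.drop (PySem.Chars.find s ['=']).toNat s := by rw [ht]
    _ = s := by rw [← hsl]; exact List.take_append_drop _ s

theorem pv_match_eq (c d : String) (hD : '=' ∉ d.toList) :
    (decide (PySem.Str.find c "=" ≠ -1 ∧
       PySem.Str.slice c none (some (PySem.Str.find c "=")) = d)) =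
    PySem.Str.startswith c (d ++ "=") := by
  have h2 : PySem.Str.find c "=" = PySem.Chars.find c.toList ['='] := by
    simp [PySem.Str.find_eq]
  have h3 : (PySem.Str.slice c none (some (PySem.Str.find c "=")) = d) ↔
      PySem.Chars.slice c.toList none (some (PySem.Chars.find c.toList ['='])) = d.toList := by
    rw [← String.toList_inj, PySem.Str.toList_slice, h2]
  have h1 : PySem.Str.startswith c (d ++ "=") =
      PySem.Chars.startswith c.toList (d.toList ++ ['=']) := by
    simp [PySem.Str.startswith_eq]
  rw [h1, ← Bool.decide_eq_true (b := PySem.Chars.startswith c.toList (d.toList ++ ['=']))]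
  have hiff := pv_prefix_iff c.toList d.toList hD
  rw [h2] at *
  exact decide_eq_decide.mpr (by rw [h3, hiff])

def pvKey (c : String) : String := PySem.Str.slice c none (some (PySem.Str.find c "="))
abbrev pvCond (c : String) : Prop :=
  PySem.Str.find c "=" ≠ -1 ∧ (PySem.Set.ofList pvClassDims).contains (pvKey c) = true

theorem pv_contains_of_mem {d : String} (hd : d ∈ pvClassDims) :
    (PySem.Set.ofList pvClassDims).contains d = true := by
  rw [PySem.Set.contains, List.contains_iff_mem, PySem.Set.mem_ofList]; exact hd

theorem pv_test_iff (c d : String) (hd : d ∈ pvClassDims) (hD : '=' ∉ d.toList) :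
    (pvCond c ∧ pvKey c = d) ↔ PySem.Str.startswith c (d ++ "=") = true := by
  rw [← pv_match_eq c d hD, decide_eq_true_eq]
  unfold pvCond pvKey
  constructor
  · rintro ⟨⟨hf, -⟩, hk⟩; exact ⟨hf, hk⟩
  · rintro ⟨hf, hk⟩; exact ⟨⟨hf, by rw [hk]; exact pv_contains_of_mem hd⟩, hk⟩

theorem pv_test_eq (c d : String) (hd : d ∈ pvClassDims) (hD : '=' ∉ d.toList) :
    (decide (pvCond c) && (pvKey c == d)) = PySem.Str.startswith c (d ++ "=") := by
  rw [Bool.eq_iff_iff, Bool.and_eq_true, decide_eq_true_eq, beq_iff_eq]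
  exact pv_test_iff c d hd hD

theorem pv_dims_no_eq : ∀ d ∈ pvClassDims, '=' ∉ d.toList := by decide

-- B's one-pass fold, normalised to a filtered fold
theorem pv_buckets_eq (class_cols : List String) :
    class_cols.foldl
      (fun m c =>
        let i := PySem.Str.find c "="
        if i ≠ -1 then
          let p := PySem.Str.slice c none (some i)
          if (PySem.Set.ofList pvClassDims).contains p then m.modify p [] (· ++ [c]) else m
        else m)
      (PySem.Dict.empty : PySem.Dict String (List String)) =
    (class_cols.filter (fun c => decide (pvCond c))).foldl
      (fun m c => m.modify (pvKey c) [] (· ++ [c])) PySem.Dict.empty := by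
  have step : class_cols.foldl
      (fun m c =>
        let i := PySem.Str.find c "="
        if i ≠ -1 then
          let p := PySem.Str.slice c none (some i)
          if (PySem.Set.ofList pvClassDims).contains p then m.modify p [] (· ++ [c]) else m
        else m)
      (PySem.Dict.empty : PySem.Dict String (List String)) =
      class_cols.foldl
        (fun m c => if pvCond c then m.modify (pvKey c) [] (· ++ [c]) else m)
        (PySem.Dict.empty : PySem.Dict String (List String)) := by
    apply PySem.List.foldl_congr_mem
    intro m c _
    simp only [pvCond, pvKey]
    split_ifs <;> tauto
  rw [step, PySem.List.foldl_ite_eq_foldl_filter pvCond _ _ _]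

theorem pv_buckets_getD (class_cols : List String) (d : String)
    (hd : d ∈ pvClassDims) (hD : '=' ∉ d.toList) :
    ((class_cols.filter (fun c => decide (pvCond c))).foldl
      (fun m c => m.modify (pvKey c) [] (· ++ [c]))
      (PySem.Dict.empty : PySem.Dict String (List String))).getD d [] =
    class_cols.filter (fun c => PySem.Str.startswith c (d ++ "=")) := by
  have h := PySem.Dict.getD_foldl_modify_append
    ((class_cols.filter (fun c => decide (pvCond c))).map (fun c => (pvKey c, c)))
    (PySem.Dict.empty : PySem.Dict String (List String)) d
  rw [List.foldl_map] at h
  rw [h, List.filter_map, List.map_map]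
  have he : (PySem.Dict.empty : PySem.Dict String (List String)).getD d [] = [] := rfl
  simp only [Function.comp_def, he, List.nil_append, List.map_id', List.filter_filter]
  apply List.filter_congr
  intro c _
  rw [← pv_test_eq c d hd hD]
  exact Bool.and_comm ..

theorem pv_buckets_contains (class_cols : List String) (d : String)
    (hd : d ∈ pvClassDims) (hD : '=' ∉ d.toList) :
    ((class_cols.filter (fun c => decide (pvCond c))).foldl
      (fun m c => m.modify (pvKey c) [] (· ++ [c]))
      (PySem.Dict.empty : PySem.Dict String (List String))).contains d =
    class_cols.any (fun c => PySem.Str.startswith c (d ++ "=")) := by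
  rw [Bool.eq_iff_iff, PySem.Dict.contains_iff_mem_keys,
      PySem.Dict.keys_foldl_modify_key _ pvKey [] (fun _ c => (· ++ [c])) _]
  have he : (PySem.Dict.empty : PySem.Dict String (List String)).keys = [] := rfl
  rw [he, List.any_eq_true]
  rw [PySem.Set.mem_update]
  simp only [List.not_mem_nil, false_or, List.mem_map, List.mem_filter, decide_eq_true_eq]
  constructor
  · rintro ⟨c, ⟨hc, hcond⟩, hk⟩
    exact ⟨c, hc, (pv_test_iff c d hd hD).mp ⟨hcond, hk⟩⟩
  · rintro ⟨c, hc, hsw⟩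
    obtain ⟨hcond, hk⟩ := (pv_test_iff c d hd hD).mpr hsw
    exact ⟨c, ⟨hc, hcond⟩, hk⟩

-- ---- tool-group splitter: A's range-indexed fold = B's take/drop chunking + enumerate ----

-- one cons-step of range(0, b, k) for positive k
theorem pv_pyRange_pos_cons (b k : Int) (hk : 0 < k) (hb : 0 < b) :
    PySem.List.pyRange 0 b k = 0 :: (PySem.List.pyRange 0 (b - k) k).map (· + k) := by
  rw [PySem.List.pyRange_of_pos _ _ hk, PySem.List.pyRange_of_pos _ _ hk]
  have hq : 0 ≤ (b - 1) / k := Int.ediv_nonneg (by omega) (by omega)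
  have hd : (b - 0 + k - 1) / k = (b - 1) / k + 1 := by
    have h : b - 0 + k - 1 = (b - 1) + 1 * k := by ring
    rw [h, Int.add_mul_ediv_right _ _ (by omega)]
  have hc1 : (if (0:Int) < b then ((b - 0 + k - 1) / k).toNat else 0) = ((b - 1) / k).toNat + 1 := by
    rw [if_pos hb, hd]; omega
  have hc2 : (if (0:Int) < b - k then ((b - k - 0 + k - 1) / k).toNat else 0) = ((b - 1) / k).toNat := by
    by_cases hbk : (0:Int) < b - k
    · rw [if_pos hbk]; congr 2; ring
    · rw [if_neg hbk]
      have : (b - 1) / k = 0 := Int.ediv_eq_zero_of_lt (by omega) (by omega)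
      omega
  rw [hc1, hc2, List.range_succ_eq_map, List.map_cons, List.map_map, List.map_map]
  congr 1
  · norm_num
  · apply List.map_congr_left
    intro j _
    simp [Function.comp, Nat.succ_eq_add_one]
    ring

-- A's growing-name append fold is enumerate of the mapped list
theorem pv_fold_enum (xs : List Int) (f : Int → List String) (init : List (String × List String)) :
    xs.foldl (fun gs i => gs ++ [("tools_g" ++ PySem.Int.toStr ((gs.length : Int) + 1), f i)]) init
      = init ++ (PySem.List.enumerate (xs.map f) ((init.length : Int) + 1)).map
          (fun kc => ("tools_g" ++ PySem.Int.toStr kc.1, kc.2)) := by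
  induction xs generalizing init with
  | nil => simp [PySem.List.enumerate_nil]
  | cons x t ih =>
    simp only [List.foldl_cons, List.map_cons, PySem.List.enumerate_cons, List.map_cons]
    rw [ih]
    simp only [List.length_append, List.length_cons, List.length_nil]
    rw [List.append_cons, List.append_assoc]
    norm_num

-- slicing at an offset is slicing the dropped list
theorem pv_slice_shift (cols : List String) (i k : Int) (h0 : 0 ≤ i) (hk : 0 < k) :
    PySem.List.slice cols (some (i + k)) (some (i + k + k)) =
      PySem.List.slice (cols.drop k.toNat) (some i) (some (i + k)) := by
  rw [PySem.List.slice_toNat cols (by omega) (by omega),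
      PySem.List.slice_toNat _ h0 (by omega), List.drop_drop]
  congr 1
  · omega
  · congr 1; omega

-- A's mapped slices over range(0, len, k) ARE B's recursive chunks
theorem pv_chunksGo_eq (fuel : Nat) (cols : List String) (k : Int) (hk : 0 < k)
    (hf : cols.length ≤ fuel) :
    (PySem.List.pyRange 0 (cols.length : Int) k).map
      (fun i => PySem.List.slice cols (some i) (some (i + k))) = pvChunksGo fuel cols k := by
  induction fuel generalizing cols with
  | zero =>
    have h : cols = [] := List.eq_nil_of_length_eq_zero (by omega)
    subst h
    simp [pvChunksGo, PySem.List.pyRange_of_pos _ _ hk]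
  | succ fuel ih =>
    by_cases hnil : cols = []
    · subst hnil
      simp [pvChunksGo, PySem.List.pyRange_of_pos _ _ hk]
    · have hL : 0 < (cols.length : Int) := by
        have := List.length_pos_iff.mpr hnil; omega
      rw [pvChunksGo, if_pos ⟨hnil, hk⟩]
      rw [pv_pyRange_pos_cons _ _ hk hL, List.map_cons, List.map_map]
      congr 1
      · norm_num
      · rw [PySem.List.slice_from cols (le_of_lt hk)]
        have hmap : List.map ((fun i => PySem.List.slice cols (some i) (some (i + k))) ∘ (· + k))
            (PySem.List.pyRange 0 ((cols.length : Int) - k) k) =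
            List.map (fun i => PySem.List.slice (cols.drop k.toNat) (some i) (some (i + k)))
            (PySem.List.pyRange 0 ((cols.length : Int) - k) k) := by
          apply List.map_congr_left
          intro i hi
          have h0 : 0 ≤ i := ((PySem.List.mem_pyRange_iff_of_pos hk i).mp hi).1
          simp only [Function.comp]
          rw [← pv_slice_shift cols i k h0 hk]
        rw [hmap]
        have hknn : (0:Int) ≤ k := le_of_lt hk
        have hcast : ((k.toNat : Int)) = k := Int.toNat_of_nonneg hknn
        have hru : PySem.List.pyRange 0 ((cols.length : Int) - k) k =
            PySem.List.pyRange 0 (((cols.drop k.toNat).length : Int)) k := by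
          by_cases hkL : k ≤ (cols.length : Int)
          · congr 1
            simp only [List.length_drop]
            omega
          · rw [PySem.List.pyRange_of_pos _ _ hk, PySem.List.pyRange_of_pos _ _ hk,
                if_neg (by omega), if_neg (by simp only [List.length_drop]; omega)]
        rw [hru]
        apply ih
        have h1 : 1 ≤ k.toNat := by omega
        have h2 : 0 < cols.length := List.length_pos_iff.mpr hnil
        simp only [List.length_drop]
        omega

theorem pv_chunks_neg (cols : List String) (k : Int) (hneg : ¬ 0 < k) :
    pvChunks cols k = [] := by
  unfold pvChunks
  cases h : cols.length with
  | zero => rfl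
  | succ f =>
    rw [pvChunksGo, if_neg]
    rintro ⟨-, h2⟩
    exact hneg h2

theorem pv_pyRange_neg_nil (L k : Int) (hL : 0 ≤ L) (hneg : k < 0) :
    PySem.List.pyRange 0 L k = [] := by
  simp only [PySem.List.pyRange]
  rw [if_neg (by omega)]
  rw [if_neg (by omega), if_neg (by omega)]
  rfl

theorem pv_split_eq (tool_cols : List String) (k : Int)
    (hpre : k ≠ 0 ∨ tool_cols = []) :
    pvSplitToolGroups tool_cols k = pvSplitToolGroupsAlt tool_cols k := by
  unfold pvSplitToolGroups pvSplitToolGroupsAlt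
  by_cases hnil : PySem.List.sorted tool_cols (fun s => s) false = []
  · rw [if_pos hnil, hnil]
    simp [pvChunks, pvChunksGo, PySem.List.enumerate_nil]
  · rw [if_neg hnil]
    have htc : tool_cols ≠ [] := by
      intro h
      exact hnil (by rw [h]; rfl)
    have hk0 : k ≠ 0 := hpre.resolve_right htc
    rcases lt_or_gt_of_ne hk0 with hneg | hpos
    · rw [pv_pyRange_neg_nil _ k (by omega) hneg, List.foldl_nil,
          pv_chunks_neg _ k (by omega)]
      simp [PySem.List.enumerate_nil]
    · rw [pv_fold_enum, show ∀ cols : List String, pvChunks cols k = pvChunksGo cols.length cols k from fun _ => rfl]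
      rw [← pv_chunksGo_eq _ _ k hpos le_rfl]
      simp

-- ---- whole-function equality ----
theorem pv_main (cc tc gc pc : List String) (k : Int) (hpre : k ≠ 0 ∨ tc = []) :
    build_leadership_axis_map_py cc tc gc pc k = build_leadership_axis_map_py_alt cc tc gc pc k := by
  unfold build_leadership_axis_map_py build_leadership_axis_map_py_alt
  simp only [pv_buckets_eq]
  set Bf := (cc.filter (fun c => decide (pvCond c))).foldl
      (fun m c => m.modify (pvKey c) [] (· ++ [c]))
      (PySem.Dict.empty : PySem.Dict String (List String)) with hBf
  have hdim : pvClassDims.foldl (fun acc d =>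
        if cc.any (fun c => PySem.Str.startswith c (d ++ "=")) then acc ++ [d] else acc) [] =
      pvClassDims.filter (fun d => Bf.contains d) := by
    rw [PySem.List.foldl_append_if_eq_filter, List.nil_append]
    apply List.filter_congr
    intro d hd
    exact (pv_buckets_contains cc d hd (pv_dims_no_eq d hd)).symm
  rw [hdim, pv_split_eq tc k hpre]
  set dim_ids := pvClassDims.filter (fun d => Bf.contains d) with hdi
  set tgs := pvSplitToolGroupsAlt tc k with htg
  refine Prod.ext rfl (Prod.ext rfl ?_)
  congr 1
  -- both dicts are one insert-fold over their entries list
  have hA : ∀ (m : PySem.Dict String (List String)),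
      ((tgs.foldl (fun m g => m.insert g.1 g.2) m).insert "triggers" gc).insert "templates" pc =
      (tgs ++ [("triggers", gc), ("templates", pc)]).foldl (fun m g => m.insert g.1 g.2) m := by
    intro m
    rw [List.foldl_append]
    rfl
  rw [hA]
  have hmapA : dim_ids.foldl
      (fun m d => m.insert d
        (cc.foldl (fun acc c => if PySem.Str.startswith c (d ++ "=") then acc ++ [c] else acc) []))
      (PySem.Dict.empty : PySem.Dict String (List String)) =
      (dim_ids.map (fun d => (d, Bf.getD d []))).foldl (fun m g => m.insert g.1 g.2)
      (PySem.Dict.empty : PySem.Dict String (List String)) := by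
    rw [List.foldl_map]
    apply PySem.List.foldl_congr_mem
    intro m d hd
    have hd' : d ∈ pvClassDims := List.mem_of_mem_filter hd
    rw [PySem.List.foldl_append_if_eq_filter, List.nil_append,
        pv_buckets_getD cc d hd' (pv_dims_no_eq d hd')]
  rw [hmapA, ← List.foldl_append, ← List.append_assoc]
  rfl

-- ===== VERDICT (by name: the statement is the Claim_ definition above) =====
theorem build_leadership_axis_map_py_spec : Claim_equal_build_leadership_axis_map_py := by
  intro class_cols tool_cols trigger_cols template_cols tool_group_size _ hpre
  unfold Spec_build_leadership_axis_map_py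
  exact pv_main class_cols tool_cols trigger_cols template_cols tool_group_size hpre
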